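-- pv_equiv track=rewrite | github.com/peachyplayzrb/thesis | 07_implementation/src/transparency/payload_builder.py | build_ordered_components
-- ===== SOURCE A (Python) =====
-- from collections.abc import Mapping
--
-- COMPONENT_ORDER = [
--     "tempo",
--     "duration_ms",
--     "key",
--     "mode",
--     "lead_genre",
--     "genre_overlap",
--     "tag_overlap",
-- ]
--
-- def canonical_component_name(name: str) -> str:
--     return name.removesuffix("_score")
--
-- def build_ordered_components(active_weights: Mapping[str, object]) -> list[str]:
--     ordered_components: list[str] = []
--     active_keys = list(active_weights.keys())
--     for canonical in COMPONENT_ORDER: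
--         for component in active_keys:
--             if (
--                 canonical_component_name(component) == canonical
--                 and component not in ordered_components
--             ):
--                 ordered_components.append(component)
--     ordered_set = set(ordered_components)
--     ordered_components.extend(
--         sorted(component for component in active_keys if component not in ordered_set)
--     )
--     return ordered_components
-- ===== SOURCE B (Python) =====
-- COMPONENT_ORDER = [
--     "tempo",
--     "duration_ms",
--     "key",
--     "mode",
--     "lead_genre",
--     "genre_overlap",
--     "tag_overlap",
-- ]
--
-- def canonical_component_name(name: str) -> str:
--     return name.removesuffix("_score")
--
-- def build_ordered_components(active_weights):
--     # One pass: bucket each key under its canonical component (buckets pre-seeded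
--     # in COMPONENT_ORDER order), collect non-matching keys separately.
--     buckets = {c: [] for c in COMPONENT_ORDER}
--     rest = []
--     for component in active_weights.keys():
--         canon = canonical_component_name(component)
--         if canon in buckets:
--             buckets[canon].append(component)
--         else:
--             rest.append(component)
--     out = []
--     for c in COMPONENT_ORDER:
--         out.extend(buckets[c])
--     out.extend(sorted(rest))
--     return out
-- ===== Notes on version B (the rewrite author's own statement) =====
-- stated objective: alternative
-- what changed: Replaces A's nested COMPONENT_ORDER-by-keys scans (with a membership check against the growing output list) by a single bucketing pass over the keys into a dict of per-canonical buckets pre-seeded in COMPONENT_ORDER order, concatenated afterwards.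
import Mathlib
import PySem

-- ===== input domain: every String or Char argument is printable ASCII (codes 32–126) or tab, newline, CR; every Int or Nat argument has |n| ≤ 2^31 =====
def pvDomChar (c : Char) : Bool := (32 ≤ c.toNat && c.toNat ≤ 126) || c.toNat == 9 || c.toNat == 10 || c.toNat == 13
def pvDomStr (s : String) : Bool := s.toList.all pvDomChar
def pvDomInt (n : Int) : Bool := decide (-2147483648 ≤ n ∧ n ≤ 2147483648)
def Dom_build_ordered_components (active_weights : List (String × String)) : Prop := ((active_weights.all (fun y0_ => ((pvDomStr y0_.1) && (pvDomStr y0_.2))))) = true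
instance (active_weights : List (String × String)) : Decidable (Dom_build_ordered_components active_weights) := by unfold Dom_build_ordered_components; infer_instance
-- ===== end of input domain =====

-- B replaces A's nested COMPONENT_ORDER × keys scans with a single bucketing pass
-- over the keys (a dict of per-canonical buckets pre-seeded in COMPONENT_ORDER order).

-- ===== PORT A =====
def COMPONENT_ORDER : List String :=
  ["tempo", "duration_ms", "key", "mode", "lead_genre", "genre_overlap", "tag_overlap"]

-- hand port of str.removesuffix("_score"): exact — drops the suffix iff the string ends with it
def canonical_component_name (name : String) : String :=
  if PySem.Str.endswith name "_score" then String.ofList (name.toList.take (name.toList.length - 6)) else name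

def build_ordered_components (active_weights : List (String × String)) : List String :=
  let active_keys := (PySem.Dict.ofList active_weights).keys
  let ordered := COMPONENT_ORDER.foldl (fun acc canonical =>
    active_keys.foldl (fun acc2 component =>
      if canonical_component_name component == canonical && !(acc2.contains component)
      then acc2 ++ [component] else acc2) acc) []
  let ordered_set := PySem.Set.ofList ordered
  ordered ++ PySem.List.sorted
    (active_keys.filter (fun component => !(PySem.Set.contains ordered_set component)))
    (fun x => x) false

-- ===== PORT B =====
def build_ordered_components_alt (active_weights : List (String × String)) : List String :=
  let buckets0 : PySem.Dict String (List String) :=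
    COMPONENT_ORDER.foldl (fun d c => d.insert c []) PySem.Dict.empty
  let st := ((PySem.Dict.ofList active_weights).keys).foldl
    (fun (st : PySem.Dict String (List String) × List String) component =>
      let canon := canonical_component_name component
      if st.1.contains canon then (st.1.modify canon [] (fun b => b ++ [component]), st.2)
      else (st.1, st.2 ++ [component]))
    (buckets0, [])
  let out := COMPONENT_ORDER.foldl (fun acc c => acc ++ st.1.getD c []) []
  out ++ PySem.List.sorted st.2 (fun x => x) false

-- ===== PRECONDITION & SPEC =====
def Spec_build_ordered_components (active_weights : List (String × String)) (out : List String) : Prop := out = build_ordered_components_alt active_weights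
instance (active_weights : List (String × String)) (out : List String) : Decidable (Spec_build_ordered_components active_weights out) := by unfold Spec_build_ordered_components; infer_instance

-- ===== CLAIM (what is proved, stated in full; the proofs are below) =====
def Claim_equal_build_ordered_components : Prop := ∀ (active_weights : List (String × String)), Dom_build_ordered_components active_weights → Spec_build_ordered_components active_weights (build_ordered_components active_weights)

-- ===== LEMMAS AND PROOFS =====

-- A's inner loop over the keys for one canonical name appends exactly the matching keys
lemma inner_loop_eq (c : String) : ∀ (ks acc : List String), ks.Nodup →
    (∀ k ∈ ks, canonical_component_name k = c → k ∉ acc) →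
    ks.foldl (fun acc2 k =>
      if canonical_component_name k == c && !(acc2.contains k) then acc2 ++ [k] else acc2) acc
    = acc ++ ks.filter (fun k => canonical_component_name k == c) := by
  intro ks
  induction ks with
  | nil => intro acc _ _; simp
  | cons k ks ih =>
    intro acc hnd hfresh
    simp only [List.foldl_cons, List.filter_cons]
    by_cases hc : canonical_component_name k = c
    · have hk : k ∉ acc := hfresh k (by simp) hc
      have : (canonical_component_name k == c && !(acc.contains k)) = true := by
        simp [hc, hk]
      rw [this]
      simp only [if_true]
      rw [ih (acc ++ [k]) hnd.of_cons ?_]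
      · simp [hc]
      · intro k' hk' hck'
        have hne : k' ≠ k := fun h => (List.nodup_cons.mp hnd).1 (h ▸ hk')
        have := hfresh k' (by simp [hk']) hck'
        simp [hne, this]
    · have : (canonical_component_name k == c && !(acc.contains k)) = false := by
        simp [hc]
      rw [this]
      simp only [Bool.false_eq_true, if_false]
      rw [ih acc hnd.of_cons (fun k' hk' h => hfresh k' (by simp [hk']) h)]
      simp [hc]

-- A's outer loop over COMPONENT_ORDER concatenates the per-canonical groups
lemma outer_loop_eq (ks : List String) (hks : ks.Nodup) : ∀ (cs acc : List String), cs.Nodup →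
    (∀ c ∈ cs, ∀ k ∈ ks, canonical_component_name k = c → k ∉ acc) →
    cs.foldl (fun acc c =>
      ks.foldl (fun acc2 k =>
        if canonical_component_name k == c && !(acc2.contains k) then acc2 ++ [k] else acc2) acc) acc
    = acc ++ cs.flatMap (fun c => ks.filter (fun k => canonical_component_name k == c)) := by
  intro cs
  induction cs with
  | nil => intro acc _ _; simp
  | cons c cs ih =>
    intro acc hnd hfresh
    simp only [List.foldl_cons, List.flatMap_cons]
    rw [inner_loop_eq c ks acc hks (fun k hk h => hfresh c (by simp) k hk h)]
    rw [ih _ hnd.of_cons ?_]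
    · simp
    · intro c' hc' k hk hck
      simp only [List.mem_append]
      rintro (h | h)
      · exact hfresh c' (by simp [hc']) k hk hck h
      · have : canonical_component_name k == c := (List.mem_filter.mp h).2
        have hcc : c' = c := by rw [← hck, eq_of_beq this]
        exact (List.nodup_cons.mp hnd).1 (hcc ▸ hc')

-- membership in the grouped prefix
lemma mem_grouped (ks : List String) (k : String) :
    k ∈ COMPONENT_ORDER.flatMap (fun c => ks.filter (fun k => canonical_component_name k == c))
    ↔ k ∈ ks ∧ canonical_component_name k ∈ COMPONENT_ORDER := by
  simp only [List.mem_flatMap, List.mem_filter, beq_iff_eq]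
  constructor
  · rintro ⟨c, hc, hk, rfl⟩; exact ⟨hk, hc⟩
  · rintro ⟨hk, hc⟩; exact ⟨_, hc, hk, rfl⟩

-- the pre-seeded bucket dict
lemma buckets0_contains (x : String) :
    (COMPONENT_ORDER.foldl (fun d c => d.insert c []) (PySem.Dict.empty : PySem.Dict String (List String))).contains x
    = decide (x ∈ COMPONENT_ORDER) := by
  rw [Bool.eq_iff_iff]
  simp only [COMPONENT_ORDER, List.foldl_cons, List.foldl_nil, PySem.Dict.contains_insert,
    PySem.Dict.contains_empty, decide_eq_true_eq, List.mem_cons, List.not_mem_nil, or_false,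
    Bool.or_eq_true, Bool.or_false, beq_iff_eq]
  tauto

lemma buckets0_getD (c : String) (hc : c ∈ COMPONENT_ORDER) :
    (COMPONENT_ORDER.foldl (fun d c => d.insert c []) (PySem.Dict.empty : PySem.Dict String (List String))).getD c []
    = [] := by
  simp only [COMPONENT_ORDER, List.mem_cons, List.not_mem_nil, or_false] at hc
  rcases hc with rfl | rfl | rfl | rfl | rfl | rfl | rfl <;> rfl

-- B's single pass: buckets collect the matching keys per canonical, rest collects the others
lemma b_loop (ks : List String) : ∀ (d : PySem.Dict String (List String)) (rest : List String),
    (∀ x, d.contains x = decide (x ∈ COMPONENT_ORDER)) →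
    (∀ c ∈ COMPONENT_ORDER,
      (ks.foldl (fun (st : PySem.Dict String (List String) × List String) component =>
        if st.1.contains (canonical_component_name component)
        then (st.1.modify (canonical_component_name component) [] (fun b => b ++ [component]), st.2)
        else (st.1, st.2 ++ [component])) (d, rest)).1.getD c []
      = d.getD c [] ++ ks.filter (fun k => canonical_component_name k == c))
    ∧ (ks.foldl (fun (st : PySem.Dict String (List String) × List String) component =>
        if st.1.contains (canonical_component_name component)
        then (st.1.modify (canonical_component_name component) [] (fun b => b ++ [component]), st.2)
        else (st.1, st.2 ++ [component])) (d, rest)).2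
      = rest ++ ks.filter (fun k => !decide (canonical_component_name k ∈ COMPONENT_ORDER)) := by
  induction ks with
  | nil => intro d rest _; simp
  | cons k ks ih =>
    intro d rest hd
    simp only [List.foldl_cons, List.filter_cons]
    by_cases hk : canonical_component_name k ∈ COMPONENT_ORDER
    · rw [show d.contains (canonical_component_name k) = true by rw [hd]; simp [hk]]
      simp only [if_true]
      have hd' : ∀ x, (d.modify (canonical_component_name k) [] (fun b => b ++ [k])).contains x
          = decide (x ∈ COMPONENT_ORDER) := by
        intro x; rw [PySem.Dict.contains_modify]
        by_cases hx : x = canonical_component_name k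
        · simp [hx, hk]
        · simp [hx, hd x]
      obtain ⟨h1, h2⟩ := ih (d.modify (canonical_component_name k) [] (fun b => b ++ [k])) rest hd'
      refine ⟨?_, ?_⟩
      · intro c hc
        rw [h1 c hc, PySem.Dict.getD_modify]
        by_cases hck : c = canonical_component_name k
        · simp [hck]
        · have : (canonical_component_name k == c) = false := by
            simp; exact fun h => hck h.symm
          simp [hck, this]
      · rw [h2]; simp [hk]
    · rw [show d.contains (canonical_component_name k) = false by rw [hd]; simp [hk]]
      simp only [Bool.false_eq_true, if_false]
      obtain ⟨h1, h2⟩ := ih d (rest ++ [k]) hd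
      refine ⟨?_, ?_⟩
      · intro c hc
        rw [h1 c hc]
        have : (canonical_component_name k == c) = false := by
          simp; exact fun h => hk (h ▸ hc)
        simp [this]
      · rw [h2]; simp [hk]

-- ===== VERDICT (by name: the statement is the Claim_ definition above) =====
theorem build_ordered_components_spec : Claim_equal_build_ordered_components := by
  intro aw _
  unfold Spec_build_ordered_components build_ordered_components build_ordered_components_alt
  simp only []
  set ks := (PySem.Dict.ofList aw).keys with hks
  have hnd : ks.Nodup := PySem.Dict.nodup_keys_ofList aw
  have hCO : COMPONENT_ORDER.Nodup := by decide
  -- A's grouped prefix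
  rw [outer_loop_eq ks hnd COMPONENT_ORDER [] hCO (by simp)]
  simp only [List.nil_append]
  set grouped := COMPONENT_ORDER.flatMap (fun c => ks.filter (fun k => canonical_component_name k == c)) with hgrouped
  -- B's loop facts
  obtain ⟨h1, h2⟩ := b_loop ks
    (COMPONENT_ORDER.foldl (fun d c => d.insert c []) PySem.Dict.empty) [] buckets0_contains
  set st := ks.foldl (fun (st : PySem.Dict String (List String) × List String) component =>
        if st.1.contains (canonical_component_name component)
        then (st.1.modify (canonical_component_name component) [] (fun b => b ++ [component]), st.2)
        else (st.1, st.2 ++ [component]))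
        (COMPONENT_ORDER.foldl (fun d c => d.insert c []) PySem.Dict.empty, []) with hst
  -- B's grouped prefix equals A's
  have hout : COMPONENT_ORDER.foldl (fun acc c => acc ++ st.1.getD c []) ([] : List String)
      = grouped := by
    have hfg : ∀ c ∈ COMPONENT_ORDER, ∀ acc : List String,
        acc ++ st.1.getD c [] = acc ++ ks.filter (fun k => canonical_component_name k == c) := by
      intro c hc acc
      rw [h1 c hc, buckets0_getD c hc]
      simp
    rw [PySem.List.foldl_congr_mem' COMPONENT_ORDER _
      (fun (acc : List String) c => acc ++ ks.filter (fun k => canonical_component_name k == c)) [] hfg]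
    rw [PySem.List.foldl_append_eq_flatMap]
    simp [hgrouped]
  rw [hout, h2]
  simp only [List.nil_append, List.append_cancel_left_eq]
  congr 1
  apply List.filter_congr
  intro k hk
  have : k ∈ grouped ↔ canonical_component_name k ∈ COMPONENT_ORDER := by
    rw [hgrouped, mem_grouped]; tauto
  simp only [PySem.Set.contains_eq_listContains]
  by_cases h : canonical_component_name k ∈ COMPONENT_ORDER
  · simp [h, PySem.Set.mem_ofList, this.mpr h]
  · simp [h, PySem.Set.mem_ofList]
    exact fun hm => h (this.mp hm)
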